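-- pv_equiv track=rewrite | github.com/Saumya-ranjan/Mastering-Coding | MEDIUM PROBLEMS/clint_and_his_love_for_number.py | clint_number
-- ===== SOURCE A (Python) =====
-- def clint_number(n):
--     count = 0
--     # two function --> prime _function and largest prime _factorization function
--     def prime(n):
--         if n == 2:
--             return True
--         for i in range(2,n):
--             if n %i ==0:
--                 return False
--         return True
--     def prime_factorization(n,i):
--         if n%i == 0:
--             return True
--         return False
--
--     while n!=0:
--         for i in range(n-1,1,-1):
--             if prime(i) == True and prime_factorization(n,i) == True:
--                 n = i
--                 count+=1
--         n-=1
--         count+=1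
--     return count
-- ===== SOURCE B (Python) =====
-- def _lpf(n):
--     # largest prime factor of n (n >= 2) by ascending trial division up to sqrt
--     m, d = n, 2
--     while d * d <= m:
--         if m % d == 0:
--             m //= d
--         else:
--             d += 1
--     return m
--
-- def clint_number(n):
--     count = 0
--     while n != 0:
--         p = _lpf(n)
--         if p < n:
--             n = p
--             count += 1
--         n -= 1
--         count += 1
--     return count
-- ===== Notes on version B (the rewrite author's own statement) =====
-- stated objective: faster
-- what changed: A rescans all candidates n-1..2 with a full O(i) trial-division primality test for each to find the largest prime factor; B computes it directly by ascending trial division up to sqrt(m), dividing out found factors, so the descending primality-tested scan disappears.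
import Mathlib
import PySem

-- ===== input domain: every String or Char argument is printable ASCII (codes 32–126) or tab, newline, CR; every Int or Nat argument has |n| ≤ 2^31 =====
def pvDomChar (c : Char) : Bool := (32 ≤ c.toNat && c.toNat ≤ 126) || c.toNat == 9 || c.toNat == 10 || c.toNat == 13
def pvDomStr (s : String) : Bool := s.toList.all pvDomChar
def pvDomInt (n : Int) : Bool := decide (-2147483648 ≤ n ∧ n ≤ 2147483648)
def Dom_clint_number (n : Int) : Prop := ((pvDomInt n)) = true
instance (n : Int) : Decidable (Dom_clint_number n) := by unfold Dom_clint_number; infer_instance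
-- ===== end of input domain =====

-- B replaces A's quadratic descending prime-candidate scan by an ascending
-- sqrt-bounded trial-division computation of the largest prime factor (objective: faster).

-- ===== PORT A =====
-- A's helper `prime(n)`: True for n == 2, else no divisor in range(2, n)
def primeA (n : Int) : Bool :=
  if n == 2 then true
  else (PySem.List.pyRange 2 n 1).all (fun i => !(PySem.Int.mod n i == 0))

-- A's inner `for i in range(n-1, 1, -1)` loop over the mutating state (n, count)
def stepA (n count : Int) : Int × Int :=
  (PySem.List.pyRange (n - 1) 1 (-1)).foldl
    (fun s i => if primeA i && (PySem.Int.mod s.1 i == 0) then (i, s.2 + 1) else s)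
    (n, count)

-- A's `while n != 0` loop.  Fuel only makes the recursion total: each iteration
-- decreases n by at least 1, so n.toNat iterations always suffice for n ≥ 0;
-- for n < 0 Python diverges (the port then just returns count).
def loopA : Nat → Int → Int → Int
  | 0, _, count => count
  | fuel + 1, n, count =>
    if n = 0 then count
    else loopA fuel ((stepA n count).1 - 1) ((stepA n count).2 + 1)

def clint_number (n : Int) : Int := loopA n.toNat n 0

-- ===== PORT B =====
-- B's helper `_lpf`: ascending trial division up to sqrt.  Fuel only makes the
-- `while d*d <= m` loop total (from the entry d = 2 it never runs out).
def lpfB : Nat → Int → Int → Int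
  | 0, m, _ => m
  | fuel + 1, m, d =>
    if d * d ≤ m then
      if PySem.Int.mod m d == 0 then lpfB fuel (PySem.Int.floordiv m d) d
      else lpfB fuel m (d + 1)
    else m

-- B's `while n != 0` loop (fuel as in loopA)
def loopB : Nat → Int → Int → Int
  | 0, _, count => count
  | fuel + 1, n, count =>
    if n = 0 then count
    else if lpfB n.toNat n 2 < n then loopB fuel (lpfB n.toNat n 2 - 1) (count + 1 + 1)
    else loopB fuel (n - 1) (count + 1)

def clint_number_alt (n : Int) : Int := loopB n.toNat n 0

-- ===== PRECONDITION & SPEC =====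
def Spec_clint_number (n : Int) (out : Int) : Prop := out = clint_number_alt n
instance (n : Int) (out : Int) : Decidable (Spec_clint_number n out) := by unfold Spec_clint_number; infer_instance

-- ===== CLAIM (what is proved, stated in full; the proofs are below) =====
def Claim_equal_clint_number : Prop := ∀ (n : Int), Dom_clint_number n → Spec_clint_number n (clint_number n)

-- ===== LEMMAS AND PROOFS =====

-- no divisor of m lies in [a, b)
def NoDiv (m a b : Int) : Prop := ∀ e : Int, a ≤ e → e < b → ¬ e ∣ m

-- "p is prime" in A's trial-division sense
def IsP (p : Int) : Prop := 2 ≤ p ∧ NoDiv p 2 p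

theorem primeA_iff (i : Int) (hi : 2 ≤ i) : primeA i = true ↔ NoDiv i 2 i := by
  unfold primeA NoDiv
  by_cases h2 : i = 2
  · subst h2
    simp only [beq_self_eq_true, if_true]
    constructor
    · intro _ e he1 he2 _; omega
    · intro _; trivial
  · rw [if_neg (by simpa using h2)]
    rw [List.all_eq_true]
    constructor
    · intro h e he1 he2 hdvd
      have hmem : e ∈ PySem.List.pyRange 2 i 1 := by
        rw [PySem.List.mem_pyRange_one]; exact ⟨he1, he2⟩
      have := h e hmem
      rw [Bool.not_eq_eq_eq_not, Bool.not_true, beq_eq_false_iff_ne] at this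
      exact this ((PySem.Int.mod_eq_zero_iff_dvd i e).mpr hdvd)
    · intro h e hmem
      rw [PySem.List.mem_pyRange_one] at hmem
      rw [Bool.not_eq_eq_eq_not, Bool.not_true, beq_eq_false_iff_ne]
      intro hmod
      exact h e hmem.1 hmem.2 ((PySem.Int.mod_eq_zero_iff_dvd i e).mp hmod)

theorem IsP_prime (p : Int) (h : IsP p) : Prime p := by
  obtain ⟨hp2, hnd⟩ := h
  rw [Int.prime_iff_natAbs_prime, Nat.prime_def_lt]
  refine ⟨by omega, ?_⟩
  intro m hm hdvd
  by_contra hm1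
  have hm0 : m ≠ 0 := by
    rintro rfl
    have : p.natAbs = 0 := Nat.eq_zero_of_zero_dvd hdvd
    omega
  have hm2 : 2 ≤ m := by omega
  have hdvdZ : (m : Int) ∣ p := by
    have h1 : (m : Int) ∣ (p.natAbs : Int) := Int.natCast_dvd_natCast.mpr hdvd
    exact dvd_trans h1 (Int.natAbs_dvd.mpr dvd_rfl)
  exact hnd m (by exact_mod_cast hm2) (by omega) hdvdZ

theorem lpfB_spec : ∀ (fuel : Nat) (m d : Int), 2 ≤ d → d ≤ m → (m - d).toNat < fuel → NoDiv m 2 d →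
    lpfB fuel m d ∣ m ∧ d ≤ lpfB fuel m d ∧ lpfB fuel m d ≤ m ∧ IsP (lpfB fuel m d) ∧
      (∀ q, IsP q → q ∣ m → q ≤ lpfB fuel m d) := by
  intro fuel
  induction fuel with
  | zero => intro m d _ _ hf _; omega
  | succ fuel ih =>
    intro m d hd hm hf hnd
    by_cases hg : d * d ≤ m
    · by_cases h2 : (PySem.Int.mod m d == 0) = true
      · -- divide-out branch
        obtain ⟨k, hk⟩ := (PySem.Int.mod_eq_zero_iff_dvd m d).mp (by simpa using h2)
        have hd0 : (0:Int) < d := by omega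
        have hfd : PySem.Int.floordiv m d = k := by
          rw [PySem.Int.floordiv_eq_ediv_of_pos hd0, hk, Int.mul_ediv_cancel_left k (by omega)]
        have hval : lpfB (fuel + 1) m d = lpfB fuel k d := by
          simp only [lpfB]
          rw [if_pos hg, if_pos h2, hfd]
        have hdk : d ≤ k := by nlinarith
        have hkm : k < m := by nlinarith
        have hkdvd : k ∣ m := ⟨d, by rw [hk]; ring⟩
        have hndk : NoDiv k 2 d := fun e he1 he2 hdvd => hnd e he1 he2 (hdvd.trans hkdvd)
        obtain ⟨ih1, ih2, ih3, ih4, ih5⟩ := ih k d hd hdk (by omega) hndk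
        rw [hval]
        refine ⟨ih1.trans hkdvd, ih2, by omega, ih4, ?_⟩
        intro q hq hqm
        have hprime : Prime q := IsP_prime q hq
        have hq' : q ∣ d * k := by rw [← hk]; exact hqm
        rcases hprime.dvd_or_dvd hq' with hqd | hqk
        · exact le_trans (Int.le_of_dvd hd0 hqd) ih2
        · exact ih5 q hq hqk
      · -- d does not divide m: d += 1
        have hndm : ¬ d ∣ m := by
          rw [← PySem.Int.mod_eq_zero_iff_dvd]
          simpa using h2
        have h2d : 2 * d ≤ d * d := by nlinarith
        have hval : lpfB (fuel + 1) m d = lpfB fuel m (d + 1) := by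
          simp only [lpfB]
          rw [if_pos hg, if_neg h2]
        have hnd' : NoDiv m 2 (d + 1) := by
          intro e he1 he2 hdvd
          by_cases he : e = d
          · exact hndm (he ▸ hdvd)
          · exact hnd e he1 (by omega) hdvd
        obtain ⟨ih1, ih2, ih3, ih4, ih5⟩ := ih m (d + 1) (by omega) (by omega) (by omega) hnd'
        rw [hval]
        exact ⟨ih1, by omega, ih3, ih4, ih5⟩
    · -- exit: d*d > m, m is prime
      have hval : lpfB (fuel + 1) m d = m := by
        simp only [lpfB]
        rw [if_neg hg]
      rw [hval]
      have hmd : m < d * d := by omega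
      refine ⟨dvd_rfl, hm, le_rfl, ⟨by omega, ?_⟩, fun q hq hqm => Int.le_of_dvd (by omega) hqm⟩
      intro e he1 he2 hdvd
      by_cases hed : e < d
      · exact hnd e he1 hed hdvd
      · rw [not_lt] at hed
        obtain ⟨k, hk⟩ := hdvd
        have he0 : (0:Int) < e := by omega
        have hm0 : (0:Int) < m := by omega
        have hk0 : (0:Int) < k := by nlinarith
        have hk1 : k ≠ 1 := by intro h1; rw [h1, mul_one] at hk; omega
        have hkd : k < d := by nlinarith
        exact hnd k (by omega) hkd ⟨e, by rw [hk]; ring⟩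

theorem fold_noop (L : List Int) :
    ∀ (s : Int × Int), (∀ j ∈ L, (primeA j && (PySem.Int.mod s.1 j == 0)) = false) →
      L.foldl (fun s i => if primeA i && (PySem.Int.mod s.1 i == 0) then (i, s.2 + 1) else s) s = s := by
  induction L with
  | nil => intro s _; rfl
  | cons a L ih =>
    intro s h
    simp only [List.foldl_cons]
    rw [if_neg (by rw [h a List.mem_cons_self]; simp)]
    exact ih s (fun j hj => h j (List.mem_cons_of_mem _ hj))

theorem step_eq (n count : Int) :
    stepA n count = if lpfB n.toNat n 2 < n then (lpfB n.toNat n 2, count + 1) else (n, count) := by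
  by_cases hn2 : n ≤ 2
  · -- empty candidate range and lpfB returns n itself
    have hl : lpfB n.toNat n 2 = n := by
      by_cases h0 : n ≤ 0
      · have : n.toNat = 0 := by omega
        rw [this, lpfB]
      · interval_cases n
        · decide
        · decide
    unfold stepA
    rw [PySem.List.pyRange_neg_one_eq_nil (by omega), hl, if_neg (lt_irrefl n)]
    rfl
  · have hn3 : 3 ≤ n := by omega
    obtain ⟨hdvd, h2r, hrm, hIsP, hmax⟩ :=
      lpfB_spec n.toNat n 2 le_rfl (by omega) (by omega) (fun e he1 he2 _ => by omega)
    set r := lpfB n.toNat n 2 with hr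
    by_cases hlt : r < n
    · have hsplit : PySem.List.pyRange (n - 1) 1 (-1)
          = (PySem.List.pyRange (r + 1) n).reverse ++ ([r] ++ (PySem.List.pyRange 2 r).reverse) := by
        rw [PySem.List.pyRange_neg_one_eq_reverse]
        have e1 : n - 1 + 1 = n := by ring
        have e2 : (1 : Int) + 1 = 2 := by norm_num
        rw [e1, e2]
        rw [PySem.List.pyRange_one_append 2 r n (by omega) (by omega),
          PySem.List.pyRange_one_cons (show r < n from hlt)]
        simp [List.reverse_append, List.reverse_cons, List.append_assoc]
      unfold stepA
      rw [hsplit, List.foldl_append]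
      have phase1 :
          (PySem.List.pyRange (r + 1) n).reverse.foldl
            (fun s i => if primeA i && (PySem.Int.mod s.1 i == 0) then (i, s.2 + 1) else s)
            (n, count) = (n, count) := by
        apply fold_noop
        intro j hj
        rw [List.mem_reverse, PySem.List.mem_pyRange_one] at hj
        by_cases hpj : primeA j = true
        · rw [hpj, Bool.true_and, beq_eq_false_iff_ne]
          intro hc
          have hjn := (PySem.Int.mod_eq_zero_iff_dvd n j).mp hc
          have hjP : IsP j := ⟨by omega, (primeA_iff j (by omega)).mp hpj⟩
          have := hmax j hjP hjn
          omega
        · rw [Bool.not_eq_true] at hpj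
          rw [hpj, Bool.false_and]
      rw [phase1, List.foldl_append, List.foldl_cons]
      rw [if_pos (by
        rw [Bool.and_eq_true]
        exact ⟨(primeA_iff r h2r).mpr hIsP.2,
          beq_iff_eq.mpr ((PySem.Int.mod_eq_zero_iff_dvd n r).mpr hdvd)⟩)]
      rw [List.foldl_nil]
      rw [fold_noop _ (r, count + 1) (by
        intro j hj
        rw [List.mem_reverse, PySem.List.mem_pyRange_one] at hj
        rw [Bool.eq_false_iff]
        intro hc
        rw [Bool.and_eq_true] at hc
        obtain ⟨_, hm⟩ := hc
        rw [beq_iff_eq] at hm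
        exact hIsP.2 j (by omega) (by omega) ((PySem.Int.mod_eq_zero_iff_dvd r j).mp hm))]
      rw [if_pos hlt]
    · have hrn : r = n := by omega
      unfold stepA
      rw [fold_noop _ (n, count) (by
        intro j hj
        rw [PySem.List.mem_pyRange_neg_one] at hj
        rw [Bool.eq_false_iff]
        intro hc
        rw [Bool.and_eq_true] at hc
        obtain ⟨_, hm⟩ := hc
        rw [beq_iff_eq] at hm
        have : j ∣ n := (PySem.Int.mod_eq_zero_iff_dvd n j).mp hm
        have hNoDiv : NoDiv n 2 n := hrn ▸ hIsP.2
        exact hNoDiv j (by omega) (by omega) this)]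
      rw [if_neg hlt]

theorem loop_eq : ∀ (fuel : Nat) (n count : Int), loopA fuel n count = loopB fuel n count := by
  intro fuel
  induction fuel with
  | zero => intro n count; rfl
  | succ fuel ih =>
    intro n count
    simp only [loopA, loopB]
    by_cases h0 : n = 0
    · rw [if_pos h0, if_pos h0]
    · rw [if_neg h0, if_neg h0]
      rw [step_eq n count]
      by_cases hlt : lpfB n.toNat n 2 < n
      · rw [if_pos hlt, if_pos hlt]
        exact ih (lpfB n.toNat n 2 - 1) (count + 1 + 1)
      · rw [if_neg hlt, if_neg hlt]
        exact ih (n - 1) (count + 1)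

-- ===== VERDICT (by name: the statement is the Claim_ definition above) =====
theorem clint_number_spec : Claim_equal_clint_number := by
  intro n _
  unfold Spec_clint_number clint_number clint_number_alt
  exact loop_eq n.toNat n 0
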